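-- pv_equiv track=rewrite | github.com/Miles128/NoteAI | utils/tag_extractor.py | extract_tags_by_doc_frequency
-- ===== SOURCE A (Python) =====
-- from typing import List, Dict, Set, Optional, Any, Tuple
--
-- MAX_TAGS = 5
--
-- MIN_DOC_FREQ_COUNT = 3
--
-- def extract_tags_by_doc_frequency(
--     doc_freq: Dict[str, int],
--     total_docs: int,
--     current_file_keywords: List[str] = None
-- ) -> List[str]:
--     """基于文档频率提取标签
--
--     规则：
--     1. 排除出现次数不大于 2 的关键词（即出现次数 >= 3）
--     2. 按出现次数从高到低排序
--     3. 提取最多 5 个标签，最少可以是 0 个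
--     4. 如果当前有关键词，优先选择当前文件包含的关键词
--
--     Args:
--         doc_freq: 关键词到出现文档数的映射
--         total_docs: 总文档数
--         current_file_keywords: 当前文件的关键词列表（可选）
--
--     Returns:
--         标签列表（0-5 个）
--     """
--     if not doc_freq or total_docs == 0:
--         return []
--
--     min_count = MIN_DOC_FREQ_COUNT
--
--     candidates = []
--     for kw, count in doc_freq.items():
--         if count >= min_count:
--             in_current = current_file_keywords and kw in current_file_keywords
--             candidates.append((kw, count, in_current))
--
--     candidates.sort(key=lambda x: (x[2], x[1]), reverse=True)
--
--     keywords = [kw for kw, count, in_current in candidates]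
--
--     return keywords[:MAX_TAGS]
-- ===== SOURCE B (Python) =====
-- MAX_TAGS = 5
--
-- MIN_DOC_FREQ_COUNT = 3
--
-- def extract_tags_by_doc_frequency(doc_freq, total_docs, current_file_keywords=None):
--     if not doc_freq or total_docs == 0:
--         return []
--     cur = current_file_keywords or []
--     cand = [(kw in cur, c, kw) for kw, c in doc_freq.items() if c >= MIN_DOC_FREQ_COUNT]
--     tags = []
--     while cand and len(tags) < MAX_TAGS:
--         best = cand[0]
--         for t in cand[1:]:
--             if (t[0], t[1]) > (best[0], best[1]):
--                 best = t
--         tags.append(best[2])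
--         cand.remove(best)
--     return tags
-- ===== Notes on version B (the rewrite author's own statement) =====
-- stated objective: alternative
-- what changed: A builds (kw,count,in_current) triples and fully sorts them with a compound key before truncating to 5; B never sorts: it precomputes the membership flag once into (in_cur,count,kw) triples and runs a top-5 selection loop, up to five times scanning the candidates for the first maximal triple under the Python tuple order (in_cur,count) and removing it, so only the 5 returned elements are ever ordered.
import Mathlib
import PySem

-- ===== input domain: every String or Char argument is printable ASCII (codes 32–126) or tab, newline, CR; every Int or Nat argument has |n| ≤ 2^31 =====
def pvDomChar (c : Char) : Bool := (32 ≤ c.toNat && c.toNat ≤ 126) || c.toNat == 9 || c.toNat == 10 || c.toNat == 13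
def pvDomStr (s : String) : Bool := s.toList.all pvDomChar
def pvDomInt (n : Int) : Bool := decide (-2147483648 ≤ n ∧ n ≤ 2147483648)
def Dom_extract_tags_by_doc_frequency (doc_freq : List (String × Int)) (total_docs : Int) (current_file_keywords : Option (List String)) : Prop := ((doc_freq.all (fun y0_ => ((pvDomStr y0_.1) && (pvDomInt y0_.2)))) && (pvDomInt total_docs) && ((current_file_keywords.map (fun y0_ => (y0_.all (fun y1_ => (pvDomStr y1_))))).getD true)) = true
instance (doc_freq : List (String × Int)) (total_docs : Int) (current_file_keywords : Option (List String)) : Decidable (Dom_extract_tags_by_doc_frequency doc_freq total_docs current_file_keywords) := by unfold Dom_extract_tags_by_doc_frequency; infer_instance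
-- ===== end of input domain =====

-- B replaces A's full compound-key sort of (kw,count,in_current) triples by a sort-free top-5
-- selection loop: it precomputes the membership flag once into (in_cur,count,kw) triples, then up
-- to five times scans for the first maximal triple under Python's tuple order (in_cur,count) and
-- removes it (alternative algorithm of similar cost; only the 5 returned elements are ever ordered).

-- ===== PORT A =====
-- Python's `in_current = current_file_keywords and kw in current_file_keywords` yields a truthy
-- value (True/False, or the falsy None/[] when the list is absent/empty); under the sort key all
-- falsy values compare equal, so the Bool below is an exact model of the comparisons performed.
def pvInCur (current_file_keywords : Option (List String)) (kw : String) : Bool :=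
  match current_file_keywords with
  | none => false
  | some l => !l.isEmpty && l.contains kw

def extract_tags_by_doc_frequency (doc_freq : List (String × Int)) (total_docs : Int) (current_file_keywords : Option (List String)) : List String :=
  if doc_freq = [] ∨ total_docs = 0 then []
  else
    let min_count : Int := 3
    let candidates : List (String × Int × Bool) :=
      doc_freq.foldl (fun acc kv =>
        if min_count ≤ kv.2 then
          acc ++ [(kv.1, kv.2, pvInCur current_file_keywords kv.1)]
        else acc) []
    let sortedC := PySem.List.sorted2 candidates (fun x => x.2.2) (fun x => x.2.1) true
    let keywords := sortedC.map (fun x => x.1)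
    keywords.take 5

-- ===== PORT B =====
-- `cur = current_file_keywords or []`
def pvCurList (current_file_keywords : Option (List String)) : List String :=
  current_file_keywords.getD []

-- Python's tuple comparison `(t[0], t[1]) > (best[0], best[1])` (lexicographic, True > False)
def pyTripleGT (a b : Bool × Int × String) : Bool :=
  (a.1 && !b.1) || (a.1 == b.1 && decide (b.2.1 < a.2.1))

-- the inner `for t in cand[1:]` scan keeping the first maximal element
def pickBest (x : Bool × Int × String) (rest : List (Bool × Int × String)) : Bool × Int × String :=
  rest.foldl (fun best t => if pyTripleGT t best then t else best) x

-- `while cand and len(tags) < MAX_TAGS`: fuel counts the remaining slots (5 at the start).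
-- `cand.remove(best)` always succeeds (best ∈ cand); `.getD []` is an unreachable totality guard.
def selectLoop : Nat → List (Bool × Int × String) → List String
  | 0, _ => []
  | _ + 1, [] => []
  | k + 1, c :: cs =>
      let best := pickBest c cs
      best.2.2 :: selectLoop k ((PySem.List.remove? (c :: cs) best).getD [])

def extract_tags_by_doc_frequency_alt (doc_freq : List (String × Int)) (total_docs : Int) (current_file_keywords : Option (List String)) : List String :=
  if doc_freq = [] ∨ total_docs = 0 then []
  else
    let cur := pvCurList current_file_keywords
    let cand := (doc_freq.filter (fun kv => decide ((3 : Int) ≤ kv.2))).map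
      (fun kv => (cur.contains kv.1, kv.2, kv.1))
    selectLoop 5 cand

-- ===== PRECONDITION & SPEC =====
def Spec_extract_tags_by_doc_frequency (doc_freq : List (String × Int)) (total_docs : Int) (current_file_keywords : Option (List String)) (out : List String) : Prop := out = extract_tags_by_doc_frequency_alt doc_freq total_docs current_file_keywords
instance (doc_freq : List (String × Int)) (total_docs : Int) (current_file_keywords : Option (List String)) (out : List String) : Decidable (Spec_extract_tags_by_doc_frequency doc_freq total_docs current_file_keywords out) := by unfold Spec_extract_tags_by_doc_frequency; infer_instance

-- ===== CLAIM (what is proved, stated in full; the proofs are below) =====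
def Claim_equal_extract_tags_by_doc_frequency : Prop := ∀ (doc_freq : List (String × Int)) (total_docs : Int) (current_file_keywords : Option (List String)), Dom_extract_tags_by_doc_frequency doc_freq total_docs current_file_keywords → Spec_extract_tags_by_doc_frequency doc_freq total_docs current_file_keywords (extract_tags_by_doc_frequency doc_freq total_docs current_file_keywords)

-- ===== LEMMAS AND PROOFS =====

-- Python's lexicographic `<` on a (bool, int) pair
def pvLexlt (u v : Bool × Int) : Bool := (!u.1 && v.1) || (u.1 == v.1 && decide (u.2 < v.2))

-- the "goes before" comparator of a reverse sort under a (bool, int)-valued key K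
def pvPrK {α : Type} (K : α → Bool × Int) (a b : α) : Bool := pvLexlt (K b) (K a)

-- the common key on the filtered (kw, count) pairs
def pvKey (cfk : Option (List String)) (kv : String × Int) : Bool × Int := (pvInCur cfk kv.1, kv.2)

-- A's insertion sort and B's first-maximum scan, abstracted
def sortR {α : Type} (pr : α → α → Bool) (L : List α) : List α :=
  L.foldl (fun acc x => PySem.List.insertBy pr x acc) []

def fmAux {α : Type} (pr : α → α → Bool) (x : α) (xs : List α) : α :=
  xs.foldl (fun b y => if pr y b then y else b) x

theorem lexlt_irrefl (u : Bool × Int) : pvLexlt u u = false := by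
  simp [pvLexlt]

theorem lexlt_trans {a b c : Bool × Int} (hab : pvLexlt a b = true) (hbc : pvLexlt b c = true) :
    pvLexlt a c = true := by
  rcases a with ⟨a1, a2⟩; rcases b with ⟨b1, b2⟩; rcases c with ⟨c1, c2⟩
  cases a1 <;> cases b1 <;> cases c1 <;> simp_all [pvLexlt] <;> omega

theorem lexlt_trans_neg {a b c : Bool × Int} (hab : pvLexlt a b = false) (hbc : pvLexlt b c = false) :
    pvLexlt a c = false := by
  rcases a with ⟨a1, a2⟩; rcases b with ⟨b1, b2⟩; rcases c with ⟨c1, c2⟩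
  cases a1 <;> cases b1 <;> cases c1 <;> simp_all [pvLexlt] <;> omega

theorem lexlt_neg_of_lt_of_neg {a b c : Bool × Int} (h1 : pvLexlt a b = true)
    (h2 : pvLexlt c b = false) : pvLexlt c a = false := by
  cases h : pvLexlt c a
  · rfl
  · rw [lexlt_trans h h1] at h2; exact h2.symm ▸ rfl

-- the three facts above, phrased on the comparator
theorem pvPrK_irrefl {α : Type} (K : α → Bool × Int) (z : α) : pvPrK K z z = false :=
  lexlt_irrefl _

theorem pvPrK_neg1 {α : Type} (K : α → Bool × Int) {x y m : α}
    (h1 : pvPrK K y x = true) (h2 : pvPrK K y m = false) : pvPrK K x m = false :=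
  lexlt_neg_of_lt_of_neg h1 h2

theorem pvPrK_neg2 {α : Type} (K : α → Bool × Int) {x y m : α}
    (h1 : pvPrK K x m = false) (h2 : pvPrK K y x = false) : pvPrK K y m = false :=
  lexlt_trans_neg h1 h2

-- the scanned maximum is an element of the list
theorem fm_mem {α : Type} (pr : α → α → Bool) (x : α) (xs : List α) :
    fmAux pr x xs ∈ x :: xs := by
  induction xs generalizing x with
  | nil => simp [fmAux]
  | cons y ys ih =>
    simp only [fmAux, List.foldl_cons]
    have h := ih (if pr y x then y else x)
    simp only [fmAux] at h
    rcases List.mem_cons.1 h with h' | h'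
    · rw [h']
      split <;> simp
    · simp [h']

theorem fm_append {α : Type} (pr : α → α → Bool) (x y : α) (xs : List α) :
    fmAux pr x (xs ++ [y]) = if pr y (fmAux pr x xs) then y else fmAux pr x xs := by
  simp [fmAux]

-- nothing in the list goes strictly before the scanned maximum
theorem fm_max {α : Type} (K : α → Bool × Int) :
    ∀ (xs : List α) (x z : α), z ∈ x :: xs →
      pvPrK K z (fmAux (pvPrK K) x xs) = false := by
  intro xs
  induction xs with
  | nil =>
    intro x z hz
    have hzx : z = x := by simpa using hz
    subst hzx
    exact pvPrK_irrefl K z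
  | cons y ys ih =>
    intro x z hz
    have hfold : fmAux (pvPrK K) x (y :: ys)
        = fmAux (pvPrK K) (if pvPrK K y x then y else x) ys := by
      simp [fmAux]
    rw [hfold]
    by_cases hp : pvPrK K y x = true
    · rw [if_pos hp]
      rcases List.mem_cons.1 hz with h | h
      · subst h
        exact pvPrK_neg1 K hp (ih y y List.mem_cons_self)
      · exact ih y z h
    · have hp' : pvPrK K y x = false := by simpa using hp
      rw [if_neg hp]
      rcases List.mem_cons.1 hz with h | h
      · subst h
        exact ih z z List.mem_cons_self
      · rcases List.mem_cons.1 h with h' | h'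
        · subst h'
          exact pvPrK_neg2 K (ih x x List.mem_cons_self) hp'
        · exact ih x z (List.mem_cons_of_mem x h')

-- one foldl step of the sort appends one insertion
theorem sortR_append {α : Type} (pr : α → α → Bool) (L : List α) (y : α) :
    sortR pr (L ++ [y]) = PySem.List.insertBy pr y (sortR pr L) := by
  simp [sortR]

-- CORE: the reverse-stable insertion sort puts the first maximum in front,
-- and its tail is the sort of the list with that occurrence removed.
theorem sortR_cons_max {α : Type} [BEq α] [LawfulBEq α] (K : α → Bool × Int) :
    ∀ (L : List α) (x : α) (xs : List α), L = x :: xs →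
      sortR (pvPrK K) L
        = fmAux (pvPrK K) x xs :: sortR (pvPrK K) (L.erase (fmAux (pvPrK K) x xs)) := by
  intro L
  induction L using List.reverseRecOn with
  | nil => intro x xs h; exact absurd h (by simp)
  | append_singleton L' y ih =>
    intro x xs h
    cases L' with
    | nil =>
      simp only [List.nil_append] at h
      injection h with h1 h2
      subst h1; subst h2
      simp [sortR, fmAux, PySem.List.insertBy]
    | cons a as =>
      simp only [List.cons_append] at h
      injection h with h1 h2
      subst h1; subst h2
      have hI := ih a as rfl
      set m := fmAux (pvPrK K) a as with hm
      rw [fm_append, sortR_append, hI]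
      by_cases hp : pvPrK K y m = true
      · -- the new element beats the old maximum: it goes to the very front
        have hynot : y ∉ a :: as := by
          intro hmem
          have := fm_max K as a y hmem
          rw [← hm] at this
          rw [this] at hp; exact absurd hp (by simp)
        have herase : ((a :: as) ++ [y]).erase y = a :: as := by
          rw [List.erase_append_right _ hynot]; simp
        rw [if_pos hp, herase, hI]
        simp [PySem.List.insertBy, hp]
      · have hp' : pvPrK K y m = false := by simpa using hp
        have hmm : m ∈ a :: as := fm_mem (pvPrK K) a as
        have herase : ((a :: as) ++ [y]).erase m = (a :: as).erase m ++ [y] :=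
          List.erase_append_left _ hmm
        rw [if_neg hp, herase, sortR_append]
        simp [PySem.List.insertBy, hp']
        exact hm

-- B's membership list computes A's truthiness flag
theorem curList_contains (cfk : Option (List String)) (kw : String) :
    (pvCurList cfk).contains kw = pvInCur cfk kw := by
  cases cfk with
  | none => rfl
  | some l => cases l <;> simp [pvCurList, pvInCur]

-- B's tuple comparison is the triple comparator under the key (t.1, t.2.1)
theorem pyTripleGT_eq (a b : Bool × Int × String) :
    pyTripleGT a b = pvPrK (fun t : Bool × Int × String => (t.1, t.2.1)) a b := by
  simp only [pyTripleGT, pvPrK, pvLexlt]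
  cases a.1 <;> cases b.1 <;> simp

-- A's comparator on the (kw, count, in_current) triples, pulled back along the pair→triple map,
-- is the comparator of the common key
theorem prA_eq (cfk : Option (List String)) (a b : String × Int) :
    ((fun u v : String × Int × Bool =>
        decide (v.2.2 < u.2.2) || !decide (u.2.2 < v.2.2) && decide (v.2.1 < u.2.1))
      (a.1, a.2, pvInCur cfk a.1) (b.1, b.2, pvInCur cfk b.1)) = pvPrK (pvKey cfk) a b := by
  simp only [pvPrK, pvKey, pvLexlt]
  cases pvInCur cfk a.1 <;> cases pvInCur cfk b.1 <;> simp

-- B's triple comparator, pulled back along the pair→flagged-triple map, is the same comparator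
theorem prB_eq (cfk : Option (List String)) (a b : String × Int) :
    pvPrK (fun t : Bool × Int × String => (t.1, t.2.1))
        ((pvCurList cfk).contains a.1, a.2, a.1) ((pvCurList cfk).contains b.1, b.2, b.1)
      = pvPrK (pvKey cfk) a b := by
  simp only [pvPrK, pvKey, curList_contains]

-- insertBy commutes with map along a relabelling of the elements
theorem insertBy_map {α β : Type} (g : α → β) (p : β → β → Bool) (x : α) (l : List α) :
    PySem.List.insertBy p (g x) (l.map g)
      = (PySem.List.insertBy (fun a b => p (g a) (g b)) x l).map g := by
  induction l with
  | nil => rfl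
  | cons y ys ih =>
    cases h : p (g x) (g y)
    · simp [PySem.List.insertBy, h, ih]
    · simp [PySem.List.insertBy, h]

theorem sortR_map {α β : Type} (g : α → β) (p : β → β → Bool) (l : List α) :
    sortR p (l.map g) = (sortR (fun a b => p (g a) (g b)) l).map g := by
  have : ∀ (acc : List α), (l.map g).foldl
      (fun acc x => PySem.List.insertBy p x acc) (acc.map g)
      = (l.foldl (fun acc x => PySem.List.insertBy (fun a b => p (g a) (g b)) x acc) acc).map g := by
    induction l with
    | nil => intro acc; rfl
    | cons y ys ih => intro acc; simp only [List.map_cons, List.foldl_cons, insertBy_map, ih]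
  simpa [sortR] using this []

-- B's selection loop = take k of the reverse-stable sorted order, projected to keywords
theorem selectLoop_eq :
    ∀ (k : Nat) (L : List (Bool × Int × String)),
      selectLoop k L
        = ((sortR (pvPrK (fun t : Bool × Int × String => (t.1, t.2.1))) L).take k).map
            (fun t => t.2.2) := by
  intro k
  induction k with
  | zero => intro L; simp [selectLoop]
  | succ k ih =>
    intro L
    cases L with
    | nil => simp [selectLoop, sortR]
    | cons c cs =>
      have hbest : pickBest c cs = fmAux (pvPrK (fun t : Bool × Int × String => (t.1, t.2.1))) c cs := by
        unfold pickBest fmAux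
        have : (fun (best t : Bool × Int × String) => if pyTripleGT t best then t else best)
            = (fun best t => if pvPrK (fun t : Bool × Int × String => (t.1, t.2.1)) t best then t else best) := by
          funext best t; rw [pyTripleGT_eq]
        rw [this]
      set m := fmAux (pvPrK (fun t : Bool × Int × String => (t.1, t.2.1))) c cs with hm
      have hmem : m ∈ c :: cs := fm_mem _ c cs
      have hrm : (PySem.List.remove? (c :: cs) m).getD [] = (c :: cs).erase m := by
        rw [PySem.List.remove?_eq_some_erase (c :: cs) m hmem]; rfl
      rw [sortR_cons_max (fun t : Bool × Int × String => (t.1, t.2.1)) (c :: cs) c cs rfl, ← hm]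
      simp only [selectLoop, hbest, hrm, List.take_succ_cons, List.map_cons]
      rw [ih]

-- ===== VERDICT (by name: the statement is the Claim_ definition above) =====
theorem extract_tags_by_doc_frequency_spec : Claim_equal_extract_tags_by_doc_frequency := by
  intro doc_freq total_docs cfk _
  unfold Spec_extract_tags_by_doc_frequency
  unfold extract_tags_by_doc_frequency extract_tags_by_doc_frequency_alt
  by_cases hguard : doc_freq = [] ∨ total_docs = 0
  · simp [hguard]
  · simp only [hguard, if_false]
    -- A's accumulation loop = filter + map to triples
    have hAcand : doc_freq.foldl (fun acc kv =>
        if (3 : Int) ≤ kv.2 then acc ++ [(kv.1, kv.2, pvInCur cfk kv.1)] else acc) []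
        = (doc_freq.filter (fun kv => decide ((3 : Int) ≤ kv.2))).map
            (fun kv => (kv.1, kv.2, pvInCur cfk kv.1)) := by
      simpa using PySem.List.foldl_append_if (fun kv : String × Int => (3 : Int) ≤ kv.2)
        (fun kv => (kv.1, kv.2, pvInCur cfk kv.1)) doc_freq []
    have hs2 : ∀ (l : List (String × Int × Bool)),
        PySem.List.sorted2 l (fun x => x.2.2) (fun x => x.2.1) true
          = sortR (fun u v : String × Int × Bool =>
              decide (v.2.2 < u.2.2) || !decide (u.2.2 < v.2.2) && decide (v.2.1 < u.2.1)) l := by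
      intro l; rfl
    rw [hAcand, hs2, sortR_map, selectLoop_eq 5, sortR_map]
    have hprA : (fun a b : String × Int =>
        (fun u v : String × Int × Bool =>
          decide (v.2.2 < u.2.2) || !decide (u.2.2 < v.2.2) && decide (v.2.1 < u.2.1))
          ((fun kv : String × Int => (kv.1, kv.2, pvInCur cfk kv.1)) a)
          ((fun kv : String × Int => (kv.1, kv.2, pvInCur cfk kv.1)) b)) = pvPrK (pvKey cfk) := by
      funext a b; exact prA_eq cfk a b
    have hprB : (fun a b : String × Int =>
        pvPrK (fun t : Bool × Int × String => (t.1, t.2.1))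
          ((fun kv : String × Int => ((pvCurList cfk).contains kv.1, kv.2, kv.1)) a)
          ((fun kv : String × Int => ((pvCurList cfk).contains kv.1, kv.2, kv.1)) b))
        = pvPrK (pvKey cfk) := by
      funext a b; exact prB_eq cfk a b
    rw [hprA, hprB]
    simp only [List.map_map, List.map_take]
    rfl
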